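-- pv_equiv track=rewrite | github.com/AYUSHSHARMA9817/SolSentry | detectors/unchecked_call.py | detect_unchecked_call
-- ===== SOURCE A (Python) =====
-- def detect_unchecked_call(ops):
--
--     for i, (_, op, val) in enumerate(ops):
--
--         if op == "external_call":
--
--             checked = False
--
--             for j in range(i + 1, len(ops)):
--
--                 _, op2, val2 = ops[j]
--
--                 if op2 == "function_call" and val2 == "require":
--                     checked = True
--                     break
--
--                 if op2 == "external_call":
--                     break
--
--             if not checked:
--                 return True
--
--     return False
-- ===== SOURCE B (Python) =====
-- def detect_unchecked_call(ops):
--     pending = False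
--     for _, op, val in ops:
--         if op == "external_call":
--             if pending:
--                 return True
--             pending = True
--         elif op == "function_call" and val == "require" and pending:
--             pending = False
--     return pending
-- ===== Notes on version B (the rewrite author's own statement) =====
-- stated objective: simpler
-- what changed: Replaced the nested forward scan (for every external_call, rescan the rest of the list for a require or next external_call) by a single linear pass maintaining one boolean 'pending' flag.
import Mathlib
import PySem

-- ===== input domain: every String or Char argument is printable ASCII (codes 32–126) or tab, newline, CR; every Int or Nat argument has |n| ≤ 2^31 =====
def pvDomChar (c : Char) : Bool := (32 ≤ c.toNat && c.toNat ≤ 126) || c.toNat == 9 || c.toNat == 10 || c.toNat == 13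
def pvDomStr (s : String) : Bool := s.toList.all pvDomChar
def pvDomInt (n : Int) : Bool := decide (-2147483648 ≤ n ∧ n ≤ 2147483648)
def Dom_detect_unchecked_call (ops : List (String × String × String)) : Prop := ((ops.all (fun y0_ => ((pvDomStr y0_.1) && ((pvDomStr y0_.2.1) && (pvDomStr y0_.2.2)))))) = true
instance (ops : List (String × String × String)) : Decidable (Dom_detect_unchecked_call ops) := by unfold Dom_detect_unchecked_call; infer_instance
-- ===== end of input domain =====

-- B replaces A's nested rescans with one linear pass carrying a 'pending' flag (O(n^2) → O(n)).

-- ===== PORT A =====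
-- inner loop: for j in range(i+1, len(ops)): returns 'checked'
def detect_unchecked_call_checkA (ops : List (String × String × String)) (j : Nat) : Bool :=
  if h : j < ops.length then
    let (_, op2, val2) := ops[j]
    if op2 == "function_call" && val2 == "require" then true
    else if op2 == "external_call" then false
    else detect_unchecked_call_checkA ops (j + 1)
  else false
termination_by ops.length - j

-- outer loop: for i, (_, op, val) in enumerate(ops)
def detect_unchecked_call_goA (ops : List (String × String × String)) (i : Nat) : Bool :=
  if h : i < ops.length then
    let (_, op, _) := ops[i]
    if op == "external_call" then
      let checked := detect_unchecked_call_checkA ops (i + 1)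
      if !checked then true else detect_unchecked_call_goA ops (i + 1)
    else detect_unchecked_call_goA ops (i + 1)
  else false
termination_by ops.length - i

def detect_unchecked_call (ops : List (String × String × String)) : Bool :=
  detect_unchecked_call_goA ops 0

-- ===== PORT B =====
def detect_unchecked_call_goB (ops : List (String × String × String)) (pending : Bool) : Bool :=
  match ops with
  | [] => pending
  | (_, op, val) :: rest =>
    if op == "external_call" then
      if pending then true else detect_unchecked_call_goB rest true
    else if op == "function_call" && val == "require" && pending then
      detect_unchecked_call_goB rest false
    else detect_unchecked_call_goB rest pending

def detect_unchecked_call_alt (ops : List (String × String × String)) : Bool :=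
  detect_unchecked_call_goB ops false

-- ===== PRECONDITION & SPEC =====
def Spec_detect_unchecked_call (ops : List (String × String × String)) (out : Bool) : Prop := out = detect_unchecked_call_alt ops
instance (ops : List (String × String × String)) (out : Bool) : Decidable (Spec_detect_unchecked_call ops out) := by unfold Spec_detect_unchecked_call; infer_instance

-- ===== CLAIM (what is proved, stated in full; the proofs are below) =====
def Claim_equal_detect_unchecked_call : Prop := ∀ (ops : List (String × String × String)), Dom_detect_unchecked_call ops → Spec_detect_unchecked_call ops (detect_unchecked_call ops)

-- ===== LEMMAS AND PROOFS =====

-- proof-only helper: scan a suffix for 'require' before the next external_call;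
-- returns the suffix after the require, if found before an external_call / the end
def pvScan (l : List (String × String × String)) : Option (List (String × String × String)) :=
  match l with
  | [] => none
  | (_, op, val) :: rest =>
    if op == "function_call" && val == "require" then some rest
    else if op == "external_call" then none
    else pvScan rest

theorem checkA_eq_scan (ops : List (String × String × String)) (j : Nat) :
    detect_unchecked_call_checkA ops (j) = (pvScan (ops.drop j)).isSome := by
  by_cases h : j < ops.length
  · have hd : ops.drop j = ops[j] :: ops.drop (j + 1) := (List.getElem_cons_drop h).symm
    rcases he : ops[j] with ⟨a, op2, val2⟩
    rw [detect_unchecked_call_checkA, hd]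
    simp only [h, dif_pos, List.get_eq_getElem, he]
    by_cases h1 : (op2 == "function_call" && val2 == "require") = true
    · simp [pvScan, h1]
    · by_cases h2 : (op2 == "external_call") = true
      · simp [pvScan, h1, h2]
      · simp only [pvScan, h1, h2, if_neg, Bool.false_eq_true, not_false_eq_true]
        exact checkA_eq_scan ops (j + 1)
  · rw [detect_unchecked_call_checkA]
    simp [h, List.drop_eq_nil_of_le (Nat.le_of_not_lt h), pvScan]
termination_by ops.length - j

-- with pending = true, B returns true unless a require closes the flag first
theorem goB_true_eq (l : List (String × String × String)) :
    detect_unchecked_call_goB l true =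
      (match pvScan l with
       | none => true
       | some t => detect_unchecked_call_goB t false) := by
  induction l with
  | nil => simp [detect_unchecked_call_goB, pvScan]
  | cons hd rest ih =>
    obtain ⟨a, op, val⟩ := hd
    by_cases h2 : (op == "external_call") = true
    · have hop := eq_of_beq h2; subst hop
      simp [detect_unchecked_call_goB, pvScan]
    · by_cases h1 : (op == "function_call" && val == "require") = true
      · simp [detect_unchecked_call_goB, pvScan, h1, h2]
      · simpa [detect_unchecked_call_goB, pvScan, h1, h2] using ih

-- with pending = false, B ignores everything up to (and including) the found require
theorem goB_false_skip (l t : List (String × String × String)) (h : pvScan l = some t) :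
    detect_unchecked_call_goB l false = detect_unchecked_call_goB t false := by
  induction l with
  | nil => simp [pvScan] at h
  | cons hd rest ih =>
    obtain ⟨a, op, val⟩ := hd
    by_cases h1 : (op == "function_call" && val == "require") = true
    · rw [Bool.and_eq_true] at h1
      have hop := eq_of_beq h1.1; subst hop
      have hval := eq_of_beq h1.2; subst hval
      simp [pvScan] at h
      simp [detect_unchecked_call_goB, h]
    · by_cases h2 : (op == "external_call") = true
      · simp [pvScan, h1, h2] at h
      · simp [pvScan, h1, h2] at h
        simpa [detect_unchecked_call_goB, h1, h2] using ih h

theorem goA_eq_goB (ops : List (String × String × String)) (i : Nat) :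
    detect_unchecked_call_goA ops i = detect_unchecked_call_goB (ops.drop i) false := by
  by_cases h : i < ops.length
  · have hd : ops.drop i = ops[i] :: ops.drop (i + 1) := (List.getElem_cons_drop h).symm
    rcases he : ops[i] with ⟨a, op, val⟩
    rw [detect_unchecked_call_goA, hd]
    simp only [h, dif_pos, List.get_eq_getElem, he]
    by_cases h2 : (op == "external_call") = true
    · simp only [h2, if_pos, detect_unchecked_call_goB, Bool.false_eq_true, if_neg,
        not_false_eq_true]
      rw [checkA_eq_scan, goB_true_eq]
      cases hs : pvScan (ops.drop (i + 1)) with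
      | none => simp
      | some t => simp [goA_eq_goB ops (i + 1), goB_false_skip _ _ hs]
    · rw [if_neg (by simpa using h2), goA_eq_goB ops (i + 1)]
      by_cases h1 : (op == "function_call" && val == "require") = true
      · simp [detect_unchecked_call_goB, h1, h2]
      · simp [detect_unchecked_call_goB, h1, h2]
  · rw [detect_unchecked_call_goA]
    simp [h, List.drop_eq_nil_of_le (Nat.le_of_not_lt h), detect_unchecked_call_goB]
termination_by ops.length - i

-- ===== VERDICT (by name: the statement is the Claim_ definition above) =====
theorem detect_unchecked_call_spec : Claim_equal_detect_unchecked_call := by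
  intro ops _
  unfold Spec_detect_unchecked_call detect_unchecked_call detect_unchecked_call_alt
  simpa using goA_eq_goB ops 0
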